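-- pv_equiv track=rewrite | github.com/pypi-data/pypi-mirror-277 | packages/storybuilder/storybuilder-0.0.42-py3-none-any.whl/storybuilder/utility.py | get_actors
-- ===== SOURCE A (Python) =====
-- VISIBLE_ACTORS=("boy", "girl", "eily")
--
-- INVISIBLE_ACTORS=("", "M", "F")
--
-- def get_actors(objects):
--     assert isinstance(objects, list)
--     actor = None
--     narrator = None
--     defaultObject = None
--     actorId = -1
--     narratorId = -1
--     defaultObjectId = -1
--     for i, object in enumerate(objects):
--         if object.get("name", None) in VISIBLE_ACTORS:
--             actor = object["name"]
--             actorId = i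
--         elif object.get("name", None) in INVISIBLE_ACTORS:
--             narrator = object["name"]
--             narratorId = i
--         else:
--             defaultObject = object.get("name", None)
--             defaultObjectId = i
--     return actor, actorId, narrator, narratorId, defaultObject, defaultObjectId
-- ===== SOURCE B (Python) =====
-- VISIBLE_ACTORS = ("boy", "girl", "eily")
--
-- INVISIBLE_ACTORS = ("", "M", "F")
--
--
-- def _last_match(names, pred):
--     for i in range(len(names) - 1, -1, -1):
--         if pred(names[i]):
--             return names[i], i
--     return None, -1
--
--
-- def get_actors(objects):
--     assert isinstance(objects, list)
--     names = [o.get("name", None) for o in objects]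
--     actor, actorId = _last_match(names, lambda n: n in VISIBLE_ACTORS)
--     narrator, narratorId = _last_match(names, lambda n: n in INVISIBLE_ACTORS)
--     defaultObject, defaultObjectId = _last_match(
--         names, lambda n: n not in VISIBLE_ACTORS and n not in INVISIBLE_ACTORS)
--     return actor, actorId, narrator, narratorId, defaultObject, defaultObjectId
-- ===== Notes on version B (the rewrite author's own statement) =====
-- stated objective: alternative
-- what changed: B first extracts the list of names, then answers each of the three categories with a separate generic last-match search over that list (stopping at the first hit from the right), instead of A's single forward fold that overwrites all three categories as it goes.
import Mathlib
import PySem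

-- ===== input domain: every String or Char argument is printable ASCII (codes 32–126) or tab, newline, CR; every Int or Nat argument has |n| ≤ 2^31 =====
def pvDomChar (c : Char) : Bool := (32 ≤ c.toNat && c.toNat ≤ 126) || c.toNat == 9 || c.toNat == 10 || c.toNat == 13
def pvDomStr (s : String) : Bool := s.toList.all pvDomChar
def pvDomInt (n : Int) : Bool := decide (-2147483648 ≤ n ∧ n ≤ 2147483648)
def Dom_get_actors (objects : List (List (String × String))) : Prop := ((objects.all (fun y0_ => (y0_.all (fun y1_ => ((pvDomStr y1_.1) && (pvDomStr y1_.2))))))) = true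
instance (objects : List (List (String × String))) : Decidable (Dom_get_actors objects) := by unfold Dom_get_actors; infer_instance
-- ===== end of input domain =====

-- B replaces A's single forward fold by three staged last-match searches over the extracted name list (alternative decomposition; same return value, proved below).

-- state of A's loop: (actor, actorId, narrator, narratorId, defaultObject, defaultObjectId)
abbrev GAState := Option String × Int × Option String × Int × Option String × Int

-- ===== PORT A =====
-- one iteration of A's forward for-loop body
def gaStep (i : Int) (object : List (String × String)) (st : GAState) : GAState :=
  let name := (PySem.Dict.mk object).get? "name"
  if name ∈ [some "boy", some "girl", some "eily"] then
    (name, i, st.2.2.1, st.2.2.2.1, st.2.2.2.2.1, st.2.2.2.2.2)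
  else if name ∈ [some "", some "M", some "F"] then
    (st.1, st.2.1, name, i, st.2.2.2.2)
  else
    (st.1, st.2.1, st.2.2.1, st.2.2.2.1, name, i)

-- A's for-loop over 'enumerate(objects)'
def gaGo (l : List (List (String × String))) (i : Int) (st : GAState) : GAState :=
  match l with
  | [] => st
  | object :: rest => gaGo rest (i + 1) (gaStep i object st)

def get_actors (objects : List (List (String × String))) : Option String × Int × Option String × Int × Option String × Int :=
  gaGo objects 0 (none, -1, none, -1, none, -1)

-- ===== PORT B =====
-- B's '_last_match': the index loop 'for i in range(len(names)-1, -1, -1)' walks the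
-- reversed name list with i the current Python index; first hit returns, else (None, -1).
def lastMatch (p : Option String → Bool) (rev : List (Option String)) (i : Int) : Option String × Int :=
  match rev with
  | [] => (none, -1)
  | n :: rest => if p n then (n, i) else lastMatch p rest (i - 1)

def visP (n : Option String) : Bool := n ∈ [some "boy", some "girl", some "eily"]
def invP (n : Option String) : Bool := n ∈ [some "", some "M", some "F"]
def defP (n : Option String) : Bool := !visP n && !invP n

def get_actors_alt (objects : List (List (String × String))) : Option String × Int × Option String × Int × Option String × Int :=
  let names := objects.map (fun o => (PySem.Dict.mk o).get? "name")
  let rev := names.reverse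
  let k : Int := (names.length : Int) - 1
  let a := lastMatch visP rev k
  let nr := lastMatch invP rev k
  let d := lastMatch defP rev k
  (a.1, a.2, nr.1, nr.2, d.1, d.2)

-- ===== PRECONDITION & SPEC =====
def Spec_get_actors (objects : List (List (String × String))) (out : Option String × Int × Option String × Int × Option String × Int) : Prop := out = get_actors_alt objects
instance (objects : List (List (String × String))) (out : Option String × Int × Option String × Int × Option String × Int) : Decidable (Spec_get_actors objects out) := by unfold Spec_get_actors; infer_instance

-- ===== CLAIM (what is proved, stated in full; the proofs are below) =====
def Claim_equal_get_actors : Prop := ∀ (objects : List (List (String × String))), Dom_get_actors objects → Spec_get_actors objects (get_actors objects)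

-- ===== LEMMAS AND PROOFS =====

theorem gaGo_append (l : List (List (String × String))) (x : List (String × String))
    (i : Int) (st : GAState) :
    gaGo (l ++ [x]) i st = gaStep (i + l.length) x (gaGo l i st) := by
  induction l generalizing i st with
  | nil => simp [gaGo]
  | cons y ys ih =>
    simp only [List.cons_append, gaGo, ih, List.length_cons]
    push_cast
    ring_nf

theorem main_eq (l : List (List (String × String))) :
    gaGo l 0 (none, -1, none, -1, none, -1)
      = (let names := l.map (fun o => (PySem.Dict.mk o).get? "name")
         let rev := names.reverse
         let k : Int := (names.length : Int) - 1
         ((lastMatch visP rev k).1, (lastMatch visP rev k).2,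
          (lastMatch invP rev k).1, (lastMatch invP rev k).2,
          (lastMatch defP rev k).1, (lastMatch defP rev k).2)) := by
  induction l using List.reverseRecOn with
  | nil => simp [gaGo, lastMatch]
  | append_singleton l x ih =>
    rw [gaGo_append, ih]
    simp only [List.map_append, List.map, List.reverse_append, List.reverse_singleton,
      List.singleton_append, List.length_append, List.length_map, List.length_cons,
      List.length_nil]
    set name := (PySem.Dict.mk x).get? "name" with hname
    by_cases h1 : name ∈ [some "boy", some "girl", some "eily"]
    · have hv : visP name = true := by simp [visP, h1]
      have hi : invP name = false := by
        simp only [List.mem_cons, List.not_mem_nil, or_false] at h1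
        rcases h1 with h | h | h <;> simp [invP, h]
      have hd : defP name = false := by simp [defP, hv]
      simp [gaStep, lastMatch, h1, hv, hi, hd, ← hname]
    · by_cases h2 : name ∈ [some "", some "M", some "F"]
      · have hv : visP name = false := by simp [visP, h1]
        have hi : invP name = true := by simp [invP, h2]
        have hd : defP name = false := by simp [defP, hi]
        simp [gaStep, lastMatch, h1, h2, hv, hi, hd, ← hname]
      · have hv : visP name = false := by simp [visP, h1]
        have hi : invP name = false := by simp [invP, h2]
        have hd : defP name = true := by simp [defP, hv, hi]
        simp [gaStep, lastMatch, h1, h2, hv, hi, hd, ← hname]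

-- ===== VERDICT (by name: the statement is the Claim_ definition above) =====
theorem get_actors_spec : Claim_equal_get_actors := by
  intro objects _
  unfold Spec_get_actors get_actors get_actors_alt
  rw [main_eq]
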